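-- pv_equiv track=rewrite | github.com/kr-colab/diploSHIC | makeFeatureVecsForSingleMsDiploid.py | getSubWinBounds
-- ===== SOURCE A (Python) =====
-- def getSubWinBounds(subWinLen, totalPhysLen): # get inclusive subwin bounds
--     subWinStart = 1
--     subWinEnd = subWinStart + subWinLen - 1
--     subWinBounds = [(subWinStart, subWinEnd)]
--     numSubWins = totalPhysLen//subWinLen
--     for i in range(1, numSubWins-1):
--         subWinStart += subWinLen
--         subWinEnd += subWinLen
--         subWinBounds.append((subWinStart, subWinEnd))
--     subWinStart += subWinLen
--     # if our subwindows are 1 bp too short due to rounding error, the last window picks up all of the slack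
--     subWinEnd = totalPhysLen
--     subWinBounds.append((subWinStart, subWinEnd))
--     return subWinBounds
-- ===== SOURCE B (Python) =====
-- def getSubWinBounds(subWinLen, totalPhysLen):  # get inclusive subwin bounds
--     # fencepost approach: build the cut points between windows, patch the last
--     # cut to totalPhysLen, then pair adjacent cuts into inclusive windows
--     numWins = max(2, totalPhysLen // subWinLen)
--     cuts = [j * subWinLen for j in range(numWins + 1)]
--     cuts[-1] = totalPhysLen
--     return [(lo + 1, hi) for lo, hi in zip(cuts, cuts[1:])]
-- ===== Notes on version B (the rewrite author's own statement) =====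
-- stated objective: alternative
-- what changed: Replaces A's incremental start/end accumulator loop by a fencepost construction: build the list of cut points j*subWinLen, patch the last cut to totalPhysLen, then pair adjacent cuts (zip with its tail) into inclusive windows.
-- outside the precondition, e.g. on getSubWinBounds(0, 10): A raises ZeroDivisionError, B raises ZeroDivisionError
import Mathlib
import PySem

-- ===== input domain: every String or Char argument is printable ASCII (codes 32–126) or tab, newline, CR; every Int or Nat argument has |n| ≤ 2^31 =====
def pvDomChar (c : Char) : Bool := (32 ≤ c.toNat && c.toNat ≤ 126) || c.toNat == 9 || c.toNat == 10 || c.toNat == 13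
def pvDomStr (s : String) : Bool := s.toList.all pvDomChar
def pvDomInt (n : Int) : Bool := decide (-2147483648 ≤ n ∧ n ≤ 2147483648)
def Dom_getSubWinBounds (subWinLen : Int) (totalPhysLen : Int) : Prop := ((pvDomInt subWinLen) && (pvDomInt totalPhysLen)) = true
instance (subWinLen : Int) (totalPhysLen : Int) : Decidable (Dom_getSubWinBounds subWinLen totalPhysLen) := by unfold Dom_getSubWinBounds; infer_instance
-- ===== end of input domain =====

-- B replaces A's incremental accumulator loop by a fencepost construction (build
-- the cut points, patch the last one, pair adjacent cuts); objective: alternative.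
-- Pre_ excludes subWinLen = 0, where A raises ZeroDivisionError (and B would too).

-- ===== PORT A =====
def getSubWinBounds (subWinLen : Int) (totalPhysLen : Int) : List (Int × Int) :=
  let subWinStart : Int := 1
  let subWinEnd : Int := subWinStart + subWinLen - 1
  let subWinBounds : List (Int × Int) := [(subWinStart, subWinEnd)]
  let numSubWins : Int := PySem.Int.floordiv totalPhysLen subWinLen
  let st := (PySem.List.pyRange 1 (numSubWins - 1) 1).foldl
    (fun (st : Int × Int × List (Int × Int)) _ =>
      (st.1 + subWinLen, st.2.1 + subWinLen,
        st.2.2 ++ [(st.1 + subWinLen, st.2.1 + subWinLen)]))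
    (subWinStart, subWinEnd, subWinBounds)
  st.2.2 ++ [(st.1 + subWinLen, totalPhysLen)]

-- ===== PORT B =====
def getSubWinBounds_alt (subWinLen : Int) (totalPhysLen : Int) : List (Int × Int) :=
  let numWins : Int := max 2 (PySem.Int.floordiv totalPhysLen subWinLen)
  let cuts : List Int := (PySem.List.pyRange 0 (numWins + 1) 1).map (fun j => j * subWinLen)
  let cuts := cuts.dropLast ++ [totalPhysLen]   -- cuts[-1] = totalPhysLen
  (cuts.zip cuts.tail).map (fun p => (p.1 + 1, p.2))

-- ===== PRECONDITION & SPEC =====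
-- A raises ZeroDivisionError when subWinLen = 0; those inputs are excluded.
def Pre_getSubWinBounds (subWinLen : Int) (_totalPhysLen : Int) : Prop := subWinLen ≠ 0
instance (subWinLen : Int) (totalPhysLen : Int) : Decidable (Pre_getSubWinBounds subWinLen totalPhysLen) := by unfold Pre_getSubWinBounds; infer_instance
def pvWitness_getSubWinBounds : Int × Int := (10, 35)

def Spec_getSubWinBounds (subWinLen : Int) (totalPhysLen : Int) (out : List (Int × Int)) : Prop := out = getSubWinBounds_alt subWinLen totalPhysLen
instance (subWinLen : Int) (totalPhysLen : Int) (out : List (Int × Int)) : Decidable (Spec_getSubWinBounds subWinLen totalPhysLen out) := by unfold Spec_getSubWinBounds; infer_instance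

-- ===== CLAIM (what is proved, stated in full; the proofs are below) =====
def Claim_equal_getSubWinBounds : Prop := ∀ (subWinLen : Int) (totalPhysLen : Int), Dom_getSubWinBounds subWinLen totalPhysLen → Pre_getSubWinBounds subWinLen totalPhysLen → Spec_getSubWinBounds subWinLen totalPhysLen (getSubWinBounds subWinLen totalPhysLen)

-- ===== LEMMAS AND PROOFS =====

-- A's loop body never reads the loop index, so the fold is an iterate of the step.
theorem foldl_ignore_elem {α S : Type} (xs : List α) (g : S → S) (s : S) :
    xs.foldl (fun st _ => g st) s = g^[xs.length] s := by
  induction xs generalizing s with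
  | nil => rfl
  | cons x xs ih => simp [List.foldl_cons, ih, Function.iterate_succ_apply]

-- closed form of A's loop state after m iterations
theorem iterate_state (L : Int) (m : Nat) :
    (fun (st : Int × Int × List (Int × Int)) =>
        (st.1 + L, st.2.1 + L, st.2.2 ++ [(st.1 + L, st.2.1 + L)]))^[m]
      (1, 1 + L - 1, [(1, 1 + L - 1)])
    = (1 + m * L, (m + 1) * L,
        (PySem.List.pyRange 0 ((m : Int) + 1) 1).map
          (fun i => (1 + i * L, (i + 1) * L))) := by
  induction m with
  | zero =>
    have h0 : PySem.List.pyRange 0 1 1 = [(0 : Int)] := by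
      have := PySem.List.pyRange_one_singleton (0 : Int)
      simpa using this
    simp [h0]
  | succ m ih =>
    rw [Function.iterate_succ_apply', ih]
    have hr : PySem.List.pyRange 0 ((m : Int) + 1 + 1) 1
        = PySem.List.pyRange 0 ((m : Int) + 1) 1 ++ [(m : Int) + 1] :=
      PySem.List.pyRange_one_succ_right (by positivity)
    push_cast
    rw [hr, List.map_append]
    simp only [List.map_cons, List.map_nil, Prod.mk.injEq]
    refine ⟨by ring, by ring, ?_⟩
    congr 2
    refine Prod.ext ?_ ?_ <;> simp <;> ring_nf

-- closed form of B's pair-adjacent-cuts construction, by induction on the cut list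
theorem zipAdj_range (g : Nat → Int) (n : Nat) (t : Int) :
    ((((List.range (n + 1)).map g ++ [t]).zip
        (((List.range (n + 1)).map g ++ [t]).tail)).map (fun p => (p.1 + 1, p.2)))
    = ((List.range n).map (fun k => (g k + 1, g (k + 1)))) ++ [(g n + 1, t)] := by
  induction n generalizing g with
  | zero => simp [List.range_succ]
  | succ n ih =>
    have h1 : List.range (n + 2) = 0 :: (List.range (n + 1)).map Nat.succ :=
      List.range_succ_eq_map (n := n + 1)
    have h2 : List.range (n + 1) = 0 :: (List.range n).map Nat.succ :=
      List.range_succ_eq_map (n := n)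
    rw [h1, h2]
    have ih' := ih (fun k => g (k + 1))
    rw [h2] at ih'
    simp only [List.map_cons, List.map_map, Function.comp_def, Nat.succ_eq_add_one,
      List.cons_append, List.tail_cons, List.zip_cons_cons, List.map_cons] at ih' ⊢
    rw [ih']

-- pyRange 0 b 1 as a mapped List.range
theorem pyRange_zero_eq_range (N : Nat) :
    PySem.List.pyRange 0 (N : Int) 1 = (List.range N).map (fun (k : Nat) => (k : Int)) := by
  have h : (((N : Int)) - 0).toNat = N := by omega
  rw [PySem.List.pyRange_one, h]
  exact List.map_congr_left (fun k _ => by simp)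

theorem getSubWinBounds_eq_alt (L T : Int) (_hL : L ≠ 0) :
    getSubWinBounds L T = getSubWinBounds_alt L T := by
  unfold getSubWinBounds getSubWinBounds_alt
  simp only
  set n := PySem.Int.floordiv T L with hn
  rw [foldl_ignore_elem, PySem.List.length_pyRange_one, iterate_state]
  set m : Nat := (n - 1 - 1).toNat with hm
  have hw : max 2 n = (m : Int) + 2 := by omega
  rw [hw]
  have hA : PySem.List.pyRange 0 ((m : Int) + 1) 1
      = (List.range (m + 1)).map (fun (k : Nat) => (k : Int)) := by
    have : ((m : Int) + 1) = ((m + 1 : Nat) : Int) := by push_cast; ring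
    rw [this, pyRange_zero_eq_range]
  have hB : PySem.List.pyRange 0 ((m : Int) + 2 + 1) 1
      = (List.range (m + 3)).map (fun (k : Nat) => (k : Int)) := by
    have : ((m : Int) + 2 + 1) = ((m + 3 : Nat) : Int) := by push_cast; ring
    rw [this, pyRange_zero_eq_range]
  rw [hA, hB, List.map_map, List.map_map]
  have hdrop : ((List.range (m + 3)).map ((fun j => j * L) ∘ (fun k : Nat => (k : Int)))).dropLast
      = (List.range (m + 2)).map ((fun j => j * L) ∘ (fun k : Nat => (k : Int))) := by
    rw [List.range_succ (n := m + 2)]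
    simp only [List.map_append, List.map_cons, List.map_nil, List.dropLast_concat]
  rw [hdrop]
  have hz := zipAdj_range ((fun j => j * L) ∘ (fun k : Nat => (k : Int))) (m + 1) T
  rw [show m + 1 + 1 = m + 2 from rfl] at hz
  rw [hz]
  simp only [Function.comp_def]
  congr 1
  · apply List.map_congr_left
    intro k _
    push_cast
    refine Prod.ext ?_ ?_ <;> simp <;> ring
  · push_cast
    refine congrArg (fun x => [x]) (Prod.ext ?_ ?_) <;> simp <;> ring

-- ===== VERDICT (by name: the statement is the Claim_ definition above) =====
theorem getSubWinBounds_spec : Claim_equal_getSubWinBounds := by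
  intro L T _ hpre
  exact getSubWinBounds_eq_alt L T hpre
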